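-- pv_equiv track=rewrite | github.com/ashm8206/Leeting | 3410-find-longest-self-contained-substring/find-longest-self-contained-substring.py | maxSubstringLength
-- ===== SOURCE A (Python) =====
-- def maxSubstringLength(s: str) -> int:
--     # https://leetcode.ca/2024-04-24-3104-Find-Longest-Self-Contained-Substring/
--     first, last = {}, {}
--     for i, c in enumerate(s):
--         if c not in first:
--             first[c] = i
--         last[c] = i
--     ans, n = -1, len(s)
--     for c, i in first.items():
--         mx = last[c]
--         for j in range(i, n):
--             a, b = first[s[j]], last[s[j]]
--             if a < i:
--                 break
--             mx = max(mx, b)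
--             if mx == j and j - i + 1 < n:
--                 ans = max(ans, j - i + 1)
--     return ans
-- ===== SOURCE B (Python) =====
-- def maxSubstringLength(s: str) -> int:
--     # Plain brute force over windows: s[i:j+1] counts iff it is a proper
--     # substring and none of its characters occur outside it.
--     n = len(s)
--     best = -1
--     for i in range(n):
--         for j in range(i, n):
--             if j - i + 1 < n and set(s[i:j+1]).isdisjoint(set(s[:i]) | set(s[j+1:])):
--                 best = max(best, j - i + 1)
--     return best
-- ===== Notes on version B (the rewrite author's own statement) =====
-- stated objective: simpler
-- what changed: Replaces the dict-driven scan with running-max and break by a plain brute-force check of every window: a window counts iff it is shorter than the string and its character set is disjoint from the characters outside it; no first/last dictionaries, no running state.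
import Mathlib
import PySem

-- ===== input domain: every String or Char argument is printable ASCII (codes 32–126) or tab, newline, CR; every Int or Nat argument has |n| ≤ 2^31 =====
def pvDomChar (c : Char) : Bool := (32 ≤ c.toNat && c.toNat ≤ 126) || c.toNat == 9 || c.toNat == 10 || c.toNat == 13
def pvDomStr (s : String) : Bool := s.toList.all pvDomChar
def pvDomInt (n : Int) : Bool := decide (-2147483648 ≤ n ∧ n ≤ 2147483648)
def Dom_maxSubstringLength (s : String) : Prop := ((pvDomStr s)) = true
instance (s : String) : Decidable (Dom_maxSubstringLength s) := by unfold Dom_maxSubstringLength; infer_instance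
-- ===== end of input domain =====

-- B replaces A's dict-driven break-scan by a plain brute-force disjointness check of every window (simpler, not faster).

-- ===== PORT A =====
-- the first loop of A: builds the dicts first (kept when the key is present) and last (always overwritten)
def pvBuildFL (cs : List Char) : PySem.Dict Char Int × PySem.Dict Char Int :=
  (PySem.List.enumerate cs 0).foldl
    (fun fl ic =>
      ((if PySem.Dict.contains fl.1 ic.2 then fl.1 else PySem.Dict.insert fl.1 ic.2 ic.1),
       PySem.Dict.insert fl.2 ic.2 ic.1))
    (PySem.Dict.empty, PySem.Dict.empty)

-- the inner 'for j in range(i, n)' loop of A, with its break (returning ans at the break);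
-- fuel is the loop length n - j (a totality guard only: the guard j < n drives the loop exactly as in Python)
def pvInnerA (first last : PySem.Dict Char Int) (cs : List Char) (n i : Int) :
    Nat → Int → Int → Int → Int
  | 0, _, _, ans => ans
  | fuel + 1, j, mx, ans =>
    if j < n then
      if PySem.Dict.getD first (PySem.List.pyGetD cs j ' ') 0 < i then ans
      else
        pvInnerA first last cs n i fuel (j + 1)
          (max mx (PySem.Dict.getD last (PySem.List.pyGetD cs j ' ') 0))
          (if max mx (PySem.Dict.getD last (PySem.List.pyGetD cs j ' ') 0) = j ∧ j - i + 1 < n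
           then max ans (j - i + 1) else ans)
    else ans

def maxSubstringLength (s : String) : Int :=
  let cs := s.toList
  let fl := pvBuildFL cs
  let n := PySem.List.len cs
  (PySem.Dict.items fl.1).foldl
    (fun ans ci => pvInnerA fl.1 fl.2 cs n ci.2 (n - ci.2).toNat ci.2
      (PySem.Dict.getD fl.2 ci.1 0) ans) (-1)

-- ===== PORT B =====
def maxSubstringLength_alt (s : String) : Int :=
  let cs := s.toList
  let n := PySem.List.len cs
  (PySem.List.pyRange 0 n 1).foldl (fun best i =>
    (PySem.List.pyRange i n 1).foldl (fun best j =>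
      if j - i + 1 < n ∧
         PySem.Set.isdisjoint
           (PySem.Set.ofList (PySem.List.slice cs (some i) (some (j + 1))))
           (PySem.Set.union (PySem.Set.ofList (PySem.List.slice cs none (some i)))
                            (PySem.Set.ofList (PySem.List.slice cs (some (j + 1)) none))) = true
      then max best (j - i + 1) else best) best) (-1)

-- ===== PRECONDITION & SPEC =====
def Spec_maxSubstringLength (s : String) (out : Int) : Prop := out = maxSubstringLength_alt s
instance (s : String) (out : Int) : Decidable (Spec_maxSubstringLength s out) := by unfold Spec_maxSubstringLength; infer_instance

-- ===== CLAIM (what is proved, stated in full; the proofs are below) =====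
def Claim_equal_maxSubstringLength : Prop := ∀ (s : String), Dom_maxSubstringLength s → Spec_maxSubstringLength s (maxSubstringLength s)

-- ===== LEMMAS AND PROOFS =====

-- ---- occurrence indices ----

-- index of the first occurrence of c in cs, as an Int
def pvFirst (cs : List Char) (c : Char) : Int := (cs.idxOf c : Int)
-- index of the last occurrence of c in cs (as a Nat, and as an Int)
def pvLastN (cs : List Char) (c : Char) : Nat := cs.length - 1 - cs.reverse.idxOf c
def pvLast (cs : List Char) (c : Char) : Int := (pvLastN cs c : Int)
-- cs[k] (total; used only where k is in range)
def pvChAt (cs : List Char) (k : Int) : Char := PySem.List.pyGetD cs k ' '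

theorem pvChAt_nat (cs : List Char) (k : Nat) (h : k < cs.length) : pvChAt cs (k : Int) = cs[k] := by
  simp [pvChAt, List.getElem?_eq_getElem h]

theorem pvChAt_int (cs : List Char) (k : Int) (h0 : 0 ≤ k) (h1 : k < (cs.length : Int)) :
    pvChAt cs k = cs[k.toNat]'(by omega) :=
  PySem.List.pyGetD_eq_getElem cs ' ' h0 h1

theorem pvChAt_mem (cs : List Char) (k : Int) (h0 : 0 ≤ k) (h1 : k < (cs.length : Int)) :
    pvChAt cs k ∈ cs := by
  rw [pvChAt_int cs k h0 h1]; exact List.getElem_mem _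

theorem pvFirst_nonneg (cs : List Char) (c : Char) : 0 ≤ pvFirst cs c := Int.natCast_nonneg _

theorem pv_idxOf_getElem_le (l : List Char) (k : Nat) (h : k < l.length) : l.idxOf l[k] ≤ k := by
  have h1 : l[k] ∈ l.take (k + 1) := by
    have h2 : (l.take (k + 1))[k]'(by simp; omega) = l[k] := List.getElem_take
    rw [← h2]; exact List.getElem_mem _
  have := (List.mem_take_iff_idxOf_lt (List.getElem_mem h)).mp h1
  omega

theorem pvChAt_first (cs : List Char) (c : Char) (h : c ∈ cs) : pvChAt cs (pvFirst cs c) = c := by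
  have hlt := List.idxOf_lt_length_of_mem h
  rw [pvFirst, pvChAt_nat cs _ hlt]
  exact List.getElem_idxOf hlt

theorem pvFirst_le_int (cs : List Char) (k : Int) (h0 : 0 ≤ k) (h1 : k < (cs.length : Int)) :
    pvFirst cs (pvChAt cs k) ≤ k := by
  rw [pvChAt_int cs k h0 h1]
  have := pv_idxOf_getElem_le cs k.toNat (by omega)
  simp [pvFirst]; omega

theorem pv_rev_getElem (cs : List Char) (k : Nat) (h : k < cs.length) :
    cs.reverse[cs.length - 1 - k]'(by simp; omega) = cs[k] := by
  rw [List.getElem_reverse]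
  congr 1
  omega

theorem pvLastN_spec (cs : List Char) (c : Char) (h : c ∈ cs) :
    ∃ hl : pvLastN cs c < cs.length, cs[pvLastN cs c] = c := by
  have hm : c ∈ cs.reverse := by simpa using h
  have hr : cs.reverse.idxOf c < cs.length := by
    have := List.idxOf_lt_length_of_mem hm
    simpa using this
  have hlen : 0 < cs.length := List.length_pos_of_mem h
  have hl : pvLastN cs c < cs.length := by unfold pvLastN; omega
  refine ⟨hl, ?_⟩
  have h1 : cs.reverse[cs.reverse.idxOf c]'(by simpa using hr) = c :=
    List.getElem_idxOf (by simpa using hr)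
  have h2 : cs.reverse[cs.length - 1 - pvLastN cs c]'(by simp; omega) = cs[pvLastN cs c] :=
    pv_rev_getElem cs (pvLastN cs c) hl
  have h3 : cs.length - 1 - pvLastN cs c = cs.reverse.idxOf c := by unfold pvLastN; omega
  simp only [h3] at h2
  rw [← h2]
  exact h1

theorem pvLastN_ge (cs : List Char) (k : Nat) (h : k < cs.length) : k ≤ pvLastN cs cs[k] := by
  have h1 : cs.reverse[cs.length - 1 - k]'(by simp; omega) = cs[k] := pv_rev_getElem cs k h
  have h2 : cs.reverse.idxOf cs[k] ≤ cs.length - 1 - k := by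
    rw [← h1]
    exact pv_idxOf_getElem_le cs.reverse _ (by simp; omega)
  unfold pvLastN; omega

theorem pvLast_ge_int (cs : List Char) (k : Int) (h0 : 0 ≤ k) (h1 : k < (cs.length : Int)) :
    k ≤ pvLast cs (pvChAt cs k) := by
  rw [pvChAt_int cs k h0 h1]
  have := pvLastN_ge cs k.toNat (by omega)
  simp [pvLast]; omega

-- membership in a prefix / suffix / infix, in terms of the occurrence indices
theorem pv_mem_drop (cs : List Char) (m : Nat) (x : Char) :
    x ∈ cs.drop m ↔ ∃ k, m ≤ k ∧ ∃ h : k < cs.length, cs[k] = x := by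
  constructor
  · intro hx
    obtain ⟨j, hj, he⟩ := List.mem_iff_getElem.mp hx
    have hj' : j < cs.length - m := by simpa using hj
    refine ⟨m + j, by omega, by omega, ?_⟩
    rw [← he, List.getElem_drop]
  · rintro ⟨k, hmk, hk, he⟩
    apply List.mem_iff_getElem.mpr
    refine ⟨k - m, by simp; omega, ?_⟩
    rw [List.getElem_drop]
    simp only [show m + (k - m) = k by omega]
    exact he

theorem pv_mem_drop_take (cs : List Char) (a b : Nat) (x : Char) :
    x ∈ (cs.drop a).take b ↔ ∃ k, a ≤ k ∧ k < a + b ∧ ∃ h : k < cs.length, cs[k] = x := by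
  constructor
  · intro hx
    obtain ⟨m, hm, he⟩ := List.mem_iff_getElem.mp hx
    have hm' : m < b ∧ m < cs.length - a := by
      simp [List.length_take, List.length_drop, Nat.lt_min] at hm
      omega
    refine ⟨a + m, by omega, by omega, by omega, ?_⟩
    rw [← he, List.getElem_take, List.getElem_drop]
  · rintro ⟨k, hak, hkb, hk, he⟩
    apply List.mem_iff_getElem.mpr
    refine ⟨k - a, by simp [List.length_take, List.length_drop]; omega, ?_⟩
    rw [List.getElem_take, List.getElem_drop]
    simp only [show a + (k - a) = k by omega]
    exact he

theorem pv_mem_take_iff (cs : List Char) (c : Char) (hc : c ∈ cs) (m : Nat) :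
    c ∈ cs.take m ↔ pvFirst cs c < (m : Int) := by
  rw [List.mem_take_iff_idxOf_lt hc]
  simp [pvFirst]

theorem pv_mem_drop_iff (cs : List Char) (c : Char) (hc : c ∈ cs) (m : Nat) :
    c ∈ cs.drop m ↔ (m : Int) ≤ pvLast cs c := by
  rw [pv_mem_drop]
  constructor
  · rintro ⟨k, hmk, hk, he⟩
    have := pvLastN_ge cs k hk
    rw [he] at this
    simp [pvLast]; omega
  · intro hm
    obtain ⟨hl, he⟩ := pvLastN_spec cs c hc
    exact ⟨pvLastN cs c, by simp [pvLast] at hm; omega, hl, he⟩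

-- ---- the common window predicate ----

def pvCond (cs : List Char) (i j : Int) : Bool :=
  decide (0 ≤ i) && decide (i ≤ j) && decide (j < (cs.length : Int)) &&
  decide (j - i + 1 < (cs.length : Int)) &&
  (PySem.List.pyRange i (j + 1) 1).all
    (fun k => decide (i ≤ pvFirst cs (pvChAt cs k)) && decide (pvLast cs (pvChAt cs k) ≤ j))

def pvWin (cs : List Char) (i j : Int) : Prop := pvCond cs i j = true

theorem pvWin_iff (cs : List Char) (i j : Int) :
    pvWin cs i j ↔ (0 ≤ i ∧ i ≤ j ∧ j < (cs.length : Int) ∧ j - i + 1 < (cs.length : Int) ∧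
      ∀ k, i ≤ k → k ≤ j → i ≤ pvFirst cs (pvChAt cs k) ∧ pvLast cs (pvChAt cs k) ≤ j) := by
  simp only [pvWin, pvCond, Bool.and_eq_true, List.all_eq_true, decide_eq_true_eq,
    PySem.List.mem_pyRange_one]
  constructor
  · rintro ⟨⟨⟨⟨h1, h2⟩, h3⟩, h4⟩, h5⟩
    exact ⟨h1, h2, h3, h4, fun k a b => h5 k ⟨a, by omega⟩⟩
  · rintro ⟨h1, h2, h3, h4, h5⟩
    exact ⟨⟨⟨⟨h1, h2⟩, h3⟩, h4⟩, fun k hk => h5 k hk.1 (by omega)⟩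

def pvGoodLen (cs : List Char) (v : Int) : Prop := ∃ i j, pvWin cs i j ∧ v = j - i + 1

theorem pvGoodLen_ge1 (cs : List Char) (v : Int) (h : pvGoodLen cs v) : 1 ≤ v := by
  obtain ⟨i, j, hw, rfl⟩ := h
  have := (pvWin_iff cs i j).mp hw
  omega

def pvIsRes (cs : List Char) (r : Int) : Prop :=
  (-1 ≤ r) ∧ (r = -1 ∨ pvGoodLen cs r) ∧ (∀ v, pvGoodLen cs v → v ≤ r)

theorem pvIsRes_unique (cs : List Char) (r r' : Int)
    (h : pvIsRes cs r) (h' : pvIsRes cs r') : r = r' := by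
  obtain ⟨h1, h2, h3⟩ := h
  obtain ⟨h1', h2', h3'⟩ := h'
  rcases h2 with rfl | hg
  · rcases h2' with rfl | hg'
    · rfl
    · have := h3 _ hg'; omega
  · have hr := h3' _ hg
    rcases h2' with rfl | hg'
    · omega
    · have := h3 _ hg'; omega

-- ---- generic if-then-max fold lemmas ----

def pvFold {ι : Type} (p : ι → Bool) (v : ι → Int) (l : List ι) (a : Int) : Int :=
  l.foldl (fun a x => if p x then max a (v x) else a) a

theorem pvFold_nil {ι : Type} (p : ι → Bool) (v : ι → Int) (a : Int) : pvFold p v [] a = a := rfl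

theorem pvFold_cons {ι : Type} (p : ι → Bool) (v : ι → Int) (x : ι) (l : List ι) (a : Int) :
    pvFold p v (x :: l) a = pvFold p v l (if p x then max a (v x) else a) := rfl

theorem pvFold_ga {ι : Type} (p : ι → Bool) (v : ι → Int) (l : List ι) (a : Int) :
    a ≤ pvFold p v l a := by
  induction l generalizing a with
  | nil => simp [pvFold]
  | cons x t ih =>
    rw [pvFold_cons]
    refine le_trans ?_ (ih _)
    split <;> omega

theorem pvFold_false {ι : Type} (p : ι → Bool) (v : ι → Int) (l : List ι) (a : Int)
    (h : ∀ x ∈ l, p x = false) : pvFold p v l a = a := by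
  induction l with
  | nil => rfl
  | cons x t ih =>
    rw [pvFold_cons, h x List.mem_cons_self]
    simp only [Bool.false_eq_true, if_false]
    exact ih fun y hy => h y (List.mem_cons_of_mem _ hy)

theorem pvFold_congr {ι : Type} (p q : ι → Bool) (v : ι → Int) (l : List ι) (a : Int)
    (h : ∀ x ∈ l, p x = q x) : pvFold p v l a = pvFold q v l a := by
  unfold pvFold
  apply PySem.List.foldl_congr_mem
  intro acc x hx
  rw [h x hx]

theorem pvFold_ub {ι : Type} (p : ι → Bool) (v : ι → Int) (l : List ι)
    (x : ι) (hp : p x = true) : ∀ (a : Int), x ∈ l → v x ≤ pvFold p v l a := by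
  induction l with
  | nil => intro a hx; cases hx
  | cons y t ih =>
    intro a hx
    rw [pvFold_cons]
    rcases List.mem_cons.mp hx with rfl | hx'
    · refine le_trans ?_ (pvFold_ga _ _ _ _)
      rw [hp]; simp
    · exact ih _ hx'

theorem pvFold_cases {ι : Type} (p : ι → Bool) (v : ι → Int) (l : List ι) (a : Int) :
    pvFold p v l a = a ∨ ∃ x ∈ l, p x = true ∧ pvFold p v l a = max a (v x) := by
  induction l generalizing a with
  | nil => left; rfl
  | cons x t ih =>
    rw [pvFold_cons]
    by_cases hp : p x = true
    · rw [hp]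
      simp only [if_true]
      rcases ih (max a (v x)) with h | ⟨y, hy, hpy, hey⟩
      · right; exact ⟨x, List.mem_cons_self, hp, h⟩
      · by_cases hvv : v x ≤ v y
        · right
          refine ⟨y, List.mem_cons_of_mem _ hy, hpy, ?_⟩
          rw [hey]; omega
        · right
          refine ⟨x, List.mem_cons_self, hp, ?_⟩
          rw [hey]; omega
    · simp only [Bool.not_eq_true] at hp
      rw [hp]
      simp only [Bool.false_eq_true, if_false]
      rcases ih a with h | ⟨y, hy, hpy, hey⟩
      · left; exact h
      · right; exact ⟨y, List.mem_cons_of_mem _ hy, hpy, hey⟩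

theorem pv_le_foldl {α : Type} (g : Int → α → Int) (hg : ∀ a x, a ≤ g a x) (l : List α) (a : Int) :
    a ≤ l.foldl g a := by
  induction l generalizing a with
  | nil => simp
  | cons x t ih => exact le_trans (hg a x) (ih _)

theorem pv_foldl_inv {α : Type} (g : Int → α → Int) (I : Int → Prop) (l : List α)
    (h : ∀ a x, x ∈ l → I a → I (g a x)) : ∀ a, I a → I (l.foldl g a) := by
  induction l with
  | nil => intro a ha; simpa using ha
  | cons x t ih =>
    intro a ha
    exact ih (fun a y hy => h a y (List.mem_cons_of_mem _ hy)) _ (h a x List.mem_cons_self ha)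

theorem pv_foldl_reach {α : Type} (g : Int → α → Int) (hg : ∀ a x, a ≤ g a x) (l : List α)
    (x : α) (hx : x ∈ l) (w : Int) (hw : ∀ a, w ≤ g a x) (a : Int) : w ≤ l.foldl g a := by
  induction l generalizing a with
  | nil => cases hx
  | cons y t ih =>
    rcases List.mem_cons.mp hx with rfl | hx'
    · exact le_trans (hw a) (pv_le_foldl g hg t _)
    · exact ih hx' _

-- ---- the nested fold computes the supremum of the recorded lengths ----

theorem pvNested_isRes {α : Type} (cs : List Char) (l : List α)
    (range : α → List Int) (p : α → Int → Bool) (iv : α → Int)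
    (hwin : ∀ x ∈ l, ∀ j ∈ range x, p x j = true → pvWin cs (iv x) j)
    (hcover : ∀ i j : Int, pvWin cs i j → ∃ x ∈ l, iv x = i ∧ j ∈ range x ∧ p x j = true) :
    pvIsRes cs (l.foldl (fun a x => pvFold (p x) (fun j => j - iv x + 1) (range x) a) (-1)) := by
  have hge : ∀ (a : Int) (x : α), a ≤ pvFold (p x) (fun j => j - iv x + 1) (range x) a :=
    fun a x => pvFold_ga _ _ _ _
  refine ⟨pv_le_foldl _ hge l (-1), ?_, ?_⟩
  · apply pv_foldl_inv _ (fun a => a = -1 ∨ pvGoodLen cs a) l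
    · intro a x hx ha
      show pvFold (p x) (fun j => j - iv x + 1) (range x) a = -1 ∨
        pvGoodLen cs (pvFold (p x) (fun j => j - iv x + 1) (range x) a)
      rcases pvFold_cases (p x) (fun j => j - iv x + 1) (range x) a with h | ⟨j, hj, hpj, hej⟩
      · rw [h]; exact ha
      · have hej' : pvFold (p x) (fun j => j - iv x + 1) (range x) a = max a (j - iv x + 1) := hej
        have hwj : pvWin cs (iv x) j := hwin x hx j hj hpj
        have hgo : pvGoodLen cs (j - iv x + 1) := ⟨iv x, j, hwj, rfl⟩
        have h1 := pvGoodLen_ge1 cs _ hgo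
        rw [hej']
        rcases ha with rfl | hga
        · right
          rw [show max (-1) (j - iv x + 1) = j - iv x + 1 by omega]
          exact hgo
        · rcases le_total a (j - iv x + 1) with hle | hle
          · right
            rw [show max a (j - iv x + 1) = j - iv x + 1 by omega]
            exact hgo
          · right
            rw [show max a (j - iv x + 1) = a by omega]
            exact hga
    · left; rfl
  · rintro v ⟨i, j, hwij, rfl⟩
    obtain ⟨x, hx, hiv, hjr, hpj⟩ := hcover i j hwij
    have hub : ∀ a : Int, j - i + 1 ≤ pvFold (p x) (fun j => j - iv x + 1) (range x) a := by
      intro a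
      have h := pvFold_ub (p x) (fun j => j - iv x + 1) (range x) j hpj a hjr
      simpa [hiv] using h
    exact pv_foldl_reach _ hge l x hx _ hub (-1)

-- ---- characterizing the dicts A builds ----

theorem pvFL_spec (cs : List Char) :
    (pvBuildFL cs).1.items = (PySem.Set.ofList cs).map (fun c => (c, pvFirst cs c)) ∧
    (∀ c, c ∈ cs → PySem.Dict.getD (pvBuildFL cs).2 c 0 = pvLast cs c) := by
  induction cs using List.reverseRecOn with
  | nil => exact ⟨rfl, by simp⟩
  | append_singleton cs x ih =>
    obtain ⟨ih1, ih2⟩ := ih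
    have hkeys : (pvBuildFL cs).1.keys = PySem.Set.ofList cs := by
      simp only [PySem.Dict.keys, ih1, List.map_map]
      simp [Function.comp_def]
    have hstep : pvBuildFL (cs ++ [x]) =
        ((if PySem.Dict.contains (pvBuildFL cs).1 x then (pvBuildFL cs).1
          else PySem.Dict.insert (pvBuildFL cs).1 x (0 + (cs.length : Int))),
         PySem.Dict.insert (pvBuildFL cs).2 x (0 + (cs.length : Int))) := by
      simp only [pvBuildFL, PySem.List.enumerate_append, List.foldl_append,
        PySem.List.enumerate_cons, PySem.List.enumerate_nil, List.foldl_cons, List.foldl_nil]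
    have hcont : PySem.Dict.contains (pvBuildFL cs).1 x = true ↔ x ∈ cs := by
      rw [PySem.Dict.contains_iff_mem_keys, hkeys, PySem.Set.mem_ofList]
    constructor
    · rw [hstep]
      by_cases hx : x ∈ cs
      · simp only [hcont.mpr hx, if_true]
        rw [ih1, PySem.Set.ofList_append_singleton,
          PySem.Set.add_of_mem ((PySem.Set.mem_ofList _ _).mpr hx)]
        apply List.map_congr_left
        intro c hc
        have hc' : c ∈ cs := (PySem.Set.mem_ofList _ _).mp hc
        simp [pvFirst, List.idxOf_append_of_mem hc']
      · have hcf : PySem.Dict.contains (pvBuildFL cs).1 x = false := by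
          cases h : PySem.Dict.contains (pvBuildFL cs).1 x
          · rfl
          · exact absurd (hcont.mp h) hx
        rw [hcf]
        simp only [Bool.false_eq_true, if_false]
        rw [PySem.Dict.items_insert_of_not_contains _ _ hcf, ih1,
          PySem.Set.ofList_append_singleton,
          PySem.Set.add_of_not_mem (fun h => hx ((PySem.Set.mem_ofList _ _).mp h)),
          List.map_append]
        congr 1
        · apply List.map_congr_left
          intro c hc
          simp [pvFirst, List.idxOf_append_of_mem ((PySem.Set.mem_ofList _ _).mp hc)]
        · simp [pvFirst, List.idxOf_append_of_notMem hx, List.idxOf_cons_self]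
    · intro c hc
      rw [hstep]
      by_cases hcx : c = x
      · subst hcx
        rw [PySem.Dict.getD_insert_self]
        have hrev : (cs ++ [c]).reverse = c :: cs.reverse := by simp
        simp [pvLast, pvLastN, hrev, List.idxOf_cons_self]
      · rw [PySem.Dict.getD_insert_of_ne _ _ _ hcx]
        have hc' : c ∈ cs := by
          rcases List.mem_append.mp hc with h | h
          · exact h
          · simp at h; exact absurd h hcx
        rw [ih2 c hc']
        have hrev : (cs ++ [x]).reverse = x :: cs.reverse := by simp
        have hxc : x ≠ c := fun h => hcx h.symm
        have h1 : (cs ++ [x]).reverse.idxOf c = cs.reverse.idxOf c + 1 := by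
          rw [hrev]; exact List.idxOf_cons_ne _ hxc
        have h2 : pvLastN (cs ++ [x]) c = pvLastN cs c := by
          unfold pvLastN
          rw [h1]
          simp only [List.length_append, List.length_cons, List.length_nil]
          omega
        simp only [pvLast, h2]

theorem pvFL_keys (cs : List Char) : (pvBuildFL cs).1.keys = PySem.Set.ofList cs := by
  simp only [PySem.Dict.keys, (pvFL_spec cs).1, List.map_map]
  simp [Function.comp_def]

theorem pvFL_first_getD (cs : List Char) (c : Char) (hc : c ∈ cs) :
    PySem.Dict.getD (pvBuildFL cs).1 c 0 = pvFirst cs c := by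
  apply PySem.Dict.getD_of_mem_items
  · rw [(pvFL_spec cs).1]
    exact List.mem_map.mpr ⟨c, (PySem.Set.mem_ofList _ _).mpr hc, rfl⟩
  · rw [pvFL_keys]
    exact PySem.Set.nodup_ofList cs

-- ---- what the inner loop of A computes ----

def pvQAB (cs : List Char) (mx i j j' : Int) : Bool :=
  (PySem.List.pyRange j (j' + 1) 1).all (fun k => decide (i ≤ pvFirst cs (pvChAt cs k))) &&
  decide (mx ≤ j') &&
  (PySem.List.pyRange j (j' + 1) 1).all (fun k => decide (pvLast cs (pvChAt cs k) ≤ j')) &&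
  decide (j' - i + 1 < (cs.length : Int))

theorem pvQAB_iff (cs : List Char) (mx i j j' : Int) :
    pvQAB cs mx i j j' = true ↔
    ((∀ k, j ≤ k → k ≤ j' → i ≤ pvFirst cs (pvChAt cs k)) ∧ mx ≤ j' ∧
     (∀ k, j ≤ k → k ≤ j' → pvLast cs (pvChAt cs k) ≤ j') ∧
     j' - i + 1 < (cs.length : Int)) := by
  simp only [pvQAB, Bool.and_eq_true, List.all_eq_true, decide_eq_true_eq,
    PySem.List.mem_pyRange_one]
  constructor
  · rintro ⟨⟨⟨h1, h2⟩, h3⟩, h4⟩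
    exact ⟨fun k a b => h1 k ⟨a, by omega⟩, h2, fun k a b => h3 k ⟨a, by omega⟩, h4⟩
  · rintro ⟨h1, h2, h3, h4⟩
    exact ⟨⟨⟨fun k hk => h1 k hk.1 (by omega), h2⟩, fun k hk => h3 k hk.1 (by omega)⟩, h4⟩

theorem pvInnerA_spec (cs : List Char) (F L : PySem.Dict Char Int)
    (hF : ∀ c ∈ cs, PySem.Dict.getD F c 0 = pvFirst cs c)
    (hL : ∀ c ∈ cs, PySem.Dict.getD L c 0 = pvLast cs c) :
    ∀ (fuel : Nat) (i j mx ans : Int), 0 ≤ i → i ≤ j → ((cs.length : Int) - j).toNat ≤ fuel →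
    pvInnerA F L cs (cs.length : Int) i fuel j mx ans =
      pvFold (fun j' => pvQAB cs mx i j j') (fun j' => j' - i + 1)
        (PySem.List.pyRange j (cs.length : Int) 1) ans := by
  intro fuel
  induction fuel with
  | zero =>
    intro i j mx ans h0 hij hf
    have hj : (cs.length : Int) ≤ j := by omega
    rw [PySem.List.pyRange_one_eq_nil hj, pvFold_nil]
    rfl
  | succ fuel ih =>
    intro i j mx ans h0 hij hf
    by_cases hjn : j < (cs.length : Int)
    · have hj0 : 0 ≤ j := by omega
      have hmem : pvChAt cs j ∈ cs := pvChAt_mem cs j hj0 hjn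
      have hFj : PySem.Dict.getD F (PySem.List.pyGetD cs j ' ') 0 = pvFirst cs (pvChAt cs j) := by
        simpa [pvChAt] using hF _ hmem
      have hLj : PySem.Dict.getD L (PySem.List.pyGetD cs j ' ') 0 = pvLast cs (pvChAt cs j) := by
        simpa [pvChAt] using hL _ hmem
      rw [show pvInnerA F L cs (cs.length : Int) i (fuel + 1) j mx ans =
          (if j < (cs.length : Int) then
            if PySem.Dict.getD F (PySem.List.pyGetD cs j ' ') 0 < i then ans
            else
              pvInnerA F L cs (cs.length : Int) i fuel (j + 1)
                (max mx (PySem.Dict.getD L (PySem.List.pyGetD cs j ' ') 0))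
                (if max mx (PySem.Dict.getD L (PySem.List.pyGetD cs j ' ') 0) = j ∧
                    j - i + 1 < (cs.length : Int)
                 then max ans (j - i + 1) else ans)
          else ans) from rfl]
      rw [if_pos hjn, hFj, hLj, PySem.List.pyRange_one_cons hjn, pvFold_cons]
      have hlast_ge : j ≤ pvLast cs (pvChAt cs j) := pvLast_ge_int cs j hj0 hjn
      by_cases hbr : pvFirst cs (pvChAt cs j) < i
      · rw [if_pos hbr]
        have hjj : pvQAB cs mx i j j = false := by
          rw [← Bool.not_eq_true, pvQAB_iff]
          intro h
          have := h.1 j le_rfl le_rfl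
          omega
        rw [hjj]
        simp only [Bool.false_eq_true, if_false]
        refine (pvFold_false _ _ _ _ ?_).symm
        intro j' hj'
        have hb := PySem.List.mem_pyRange_one.mp hj'
        rw [← Bool.not_eq_true, pvQAB_iff]
        intro h
        have := h.1 j le_rfl (by omega)
        omega
      · rw [if_neg hbr]
        push_neg at hbr
        rw [ih i (j + 1) (max mx (pvLast cs (pvChAt cs j))) _ h0 (by omega) (by omega)]
        have hstep : (if pvQAB cs mx i j j = true then max ans (j - i + 1) else ans) =
            (if max mx (pvLast cs (pvChAt cs j)) = j ∧ j - i + 1 < (cs.length : Int)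
             then max ans (j - i + 1) else ans) := by
          by_cases hc : max mx (pvLast cs (pvChAt cs j)) = j ∧ j - i + 1 < (cs.length : Int)
          · rw [if_pos hc, if_pos]
            rw [pvQAB_iff]
            refine ⟨fun k a b => ?_, by omega, fun k a b => ?_, hc.2⟩
            · have hk : k = j := by omega
              rw [hk]; exact hbr
            · have hk : k = j := by omega
              rw [hk]; omega
          · rw [if_neg hc, if_neg]
            rw [pvQAB_iff]
            intro h
            apply hc
            have h1 := h.2.1
            have h2 := h.2.2.1 j le_rfl le_rfl
            exact ⟨by omega, h.2.2.2⟩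
        rw [← hstep]
        apply pvFold_congr
        intro j' hj'
        have hb := PySem.List.mem_pyRange_one.mp hj'
        rw [Bool.eq_iff_iff, pvQAB_iff, pvQAB_iff]
        constructor
        · rintro ⟨h1, h2, h3, h4⟩
          refine ⟨fun k a b => ?_, by omega, fun k a b => ?_, h4⟩
          · by_cases hk : k = j
            · rw [hk]; exact hbr
            · exact h1 k (by omega) b
          · by_cases hk : k = j
            · rw [hk]; omega
            · exact h3 k (by omega) b
        · rintro ⟨h1, h2, h3, h4⟩
          have h3j := h3 j le_rfl (by omega)
          refine ⟨fun k a b => h1 k (by omega) b, by omega,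
            fun k a b => h3 k (by omega) b, h4⟩
    · rw [PySem.List.pyRange_one_eq_nil (by omega), pvFold_nil]
      show (if j < (cs.length : Int) then _ else ans) = ans
      rw [if_neg hjn]

-- ---- assembling A ----

theorem pvA_eq (s : String) :
    maxSubstringLength s =
      (PySem.Set.ofList s.toList).foldl
        (fun ans c =>
          pvFold (fun j' => pvQAB s.toList (pvLast s.toList c) (pvFirst s.toList c) (pvFirst s.toList c) j')
            (fun j' => j' - pvFirst s.toList c + 1)
            (PySem.List.pyRange (pvFirst s.toList c) (s.toList.length : Int) 1) ans) (-1) := by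
  dsimp only [maxSubstringLength]
  rw [PySem.List.len_eq, (pvFL_spec s.toList).1, List.foldl_map]
  apply PySem.List.foldl_congr_mem
  intro a c hc
  have hc' : c ∈ s.toList := (PySem.Set.mem_ofList _ _).mp hc
  rw [(pvFL_spec s.toList).2 c hc']
  exact pvInnerA_spec s.toList _ _ (fun c hc => pvFL_first_getD s.toList c hc)
    (fun c hc => (pvFL_spec s.toList).2 c hc)
    ((s.toList.length : Int) - pvFirst s.toList c).toNat
    (pvFirst s.toList c) (pvFirst s.toList c) _ a (pvFirst_nonneg _ _) le_rfl le_rfl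

theorem pvQA_start (cs : List Char) (c : Char) (hc : c ∈ cs) (j : Int)
    (hj1 : pvFirst cs c ≤ j) (hj2 : j < (cs.length : Int)) :
    (pvQAB cs (pvLast cs c) (pvFirst cs c) (pvFirst cs c) j = true) ↔ pvWin cs (pvFirst cs c) j := by
  rw [pvQAB_iff, pvWin_iff]
  constructor
  · rintro ⟨h1, h2, h3, h4⟩
    exact ⟨pvFirst_nonneg cs c, hj1, hj2, h4, fun k a b => ⟨h1 k a b, h3 k a b⟩⟩
  · rintro ⟨_, _, _, h4, h5⟩
    refine ⟨fun k a b => (h5 k a b).1, ?_, fun k a b => (h5 k a b).2, h4⟩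
    have := (h5 (pvFirst cs c) le_rfl hj1).2
    rwa [pvChAt_first cs c hc] at this

theorem pvWin_start (cs : List Char) (i j : Int) (h : pvWin cs i j) :
    pvChAt cs i ∈ cs ∧ pvFirst cs (pvChAt cs i) = i := by
  rw [pvWin_iff] at h
  obtain ⟨h0, hij, hj, _, hall⟩ := h
  have hiL : i < (cs.length : Int) := by omega
  exact ⟨pvChAt_mem cs i h0 hiL, le_antisymm (pvFirst_le_int cs i h0 hiL) (hall i le_rfl hij).1⟩

theorem pvA_isRes (s : String) : pvIsRes s.toList (maxSubstringLength s) := by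
  rw [pvA_eq]
  apply pvNested_isRes
  · intro c hc j hj hp
    have hc' : c ∈ s.toList := (PySem.Set.mem_ofList _ _).mp hc
    have hb := PySem.List.mem_pyRange_one.mp hj
    exact (pvQA_start s.toList c hc' j hb.1 hb.2).mp hp
  · intro i j hw
    obtain ⟨hmem, hfirst⟩ := pvWin_start s.toList i j hw
    have hwi := (pvWin_iff s.toList i j).mp hw
    refine ⟨pvChAt s.toList i, (PySem.Set.mem_ofList _ _).mpr hmem, hfirst, ?_, ?_⟩
    · rw [hfirst]
      exact PySem.List.mem_pyRange_one.mpr ⟨by omega, by omega⟩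
    · exact (pvQA_start s.toList _ hmem j (by rw [hfirst]; omega) (by omega)).mpr
        (by rwa [hfirst])

-- ---- assembling B ----

theorem pvCondB_iff (cs : List Char) (i j : Int) (h0 : 0 ≤ i) (hij : i ≤ j)
    (hj : j < (cs.length : Int)) :
    ((j - i + 1 < (cs.length : Int)) ∧
      PySem.Set.isdisjoint
        (PySem.Set.ofList (PySem.List.slice cs (some i) (some (j + 1))))
        (PySem.Set.union (PySem.Set.ofList (PySem.List.slice cs none (some i)))
                         (PySem.Set.ofList (PySem.List.slice cs (some (j + 1)) none))) = true) ↔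
    pvWin cs i j := by
  rw [PySem.List.slice_toNat cs h0 (by omega : (0:Int) ≤ j + 1), PySem.List.slice_to cs h0,
    PySem.List.slice_from cs (by omega : (0:Int) ≤ j + 1)]
  rw [pvWin_iff]
  constructor
  · rintro ⟨hlen, hdisj⟩
    refine ⟨h0, hij, hj, hlen, ?_⟩
    intro k hk1 hk2
    have hk0 : 0 ≤ k := by omega
    have hkL : k < (cs.length : Int) := by omega
    have hx : pvChAt cs k = cs[k.toNat]'(by omega) := pvChAt_int cs k hk0 hkL
    have hxmem : pvChAt cs k ∈ cs := pvChAt_mem cs k hk0 hkL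
    have hwin : pvChAt cs k ∈ (cs.drop i.toNat).take ((j + 1).toNat - i.toNat) := by
      rw [pv_mem_drop_take]
      exact ⟨k.toNat, by omega, by omega, by omega, hx.symm⟩
    have hnot := (PySem.Set.isdisjoint_iff _ _).mp hdisj _
      ((PySem.Set.mem_ofList _ _).mpr hwin)
    rw [PySem.Set.mem_union] at hnot
    push_neg at hnot
    rw [PySem.Set.mem_ofList, PySem.Set.mem_ofList] at hnot
    constructor
    · by_contra hlt
      push_neg at hlt
      exact hnot.1 ((pv_mem_take_iff cs _ hxmem i.toNat).mpr (by omega))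
    · by_contra hgt
      push_neg at hgt
      exact hnot.2 ((pv_mem_drop_iff cs _ hxmem (j + 1).toNat).mpr (by omega))
  · rintro ⟨_, _, _, hlen, hall⟩
    refine ⟨hlen, (PySem.Set.isdisjoint_iff _ _).mpr ?_⟩
    intro x hx
    rw [PySem.Set.mem_ofList, pv_mem_drop_take] at hx
    obtain ⟨k, hik, hkj, hkL, he⟩ := hx
    have hxcs : x ∈ cs := by rw [← he]; exact List.getElem_mem _
    have hxk : pvChAt cs (k : Int) = x := by rw [pvChAt_nat cs k hkL]; exact he
    have hk := hall (k : Int) (by omega) (by omega)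
    rw [hxk] at hk
    rw [PySem.Set.mem_union, PySem.Set.mem_ofList, PySem.Set.mem_ofList]
    push_neg
    constructor
    · rw [pv_mem_take_iff cs x hxcs i.toNat]
      omega
    · rw [pv_mem_drop_iff cs x hxcs (j + 1).toNat]
      omega

theorem pvB_eq (s : String) :
    maxSubstringLength_alt s =
      (PySem.List.pyRange 0 (s.toList.length : Int) 1).foldl
        (fun best i =>
          pvFold (fun j => pvCond s.toList i j) (fun j => j - i + 1)
            (PySem.List.pyRange i (s.toList.length : Int) 1) best) (-1) := by
  dsimp only [maxSubstringLength_alt]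
  rw [PySem.List.len_eq]
  apply PySem.List.foldl_congr_mem
  intro a i hi
  have hi' := PySem.List.mem_pyRange_one.mp hi
  unfold pvFold
  apply PySem.List.foldl_congr_mem
  intro b j hj
  have hj' := PySem.List.mem_pyRange_one.mp hj
  apply if_congr _ rfl rfl
  exact pvCondB_iff s.toList i j hi'.1 hj'.1 hj'.2

theorem pvB_isRes (s : String) : pvIsRes s.toList (maxSubstringLength_alt s) := by
  rw [pvB_eq]
  apply pvNested_isRes s.toList _ _ _ (fun i => i)
  · intro i _ j _ hp
    exact hp
  · intro i j hw
    have hwi := (pvWin_iff s.toList i j).mp hw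
    exact ⟨i, PySem.List.mem_pyRange_one.mpr ⟨by omega, by omega⟩, rfl,
      PySem.List.mem_pyRange_one.mpr ⟨by omega, by omega⟩, hw⟩

-- ===== VERDICT (by name: the statement is the Claim_ definition above) =====
theorem maxSubstringLength_spec : Claim_equal_maxSubstringLength := by
  intro s _
  unfold Spec_maxSubstringLength
  exact pvIsRes_unique s.toList _ _ (pvA_isRes s) (pvB_isRes s)
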